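-- pv_equiv track=rewrite | github.com/babasveeramallu/ncl-ctf-pptx | backend/modules/crypto_service.py | decode_affine
-- ===== SOURCE A (Python) =====
-- from typing import Any, Callable, Dict, List, Tuple
--
-- def _mod_inv(a: int, m: int) -> int:
--     a %= m
--     for x in range(1, m):
--         if (a * x) % m == 1:
--             return x
--     raise ValueError("no modular inverse")
--
-- def decode_affine(data: str, a: int, b: int) -> str:
--     inv = _mod_inv(a, 26)
--     out: List[str] = []
--     for ch in data:
--         if "A" <= ch <= "Z":
--             y = ord(ch) - ord("A")
--             x = (inv * (y - b)) % 26
--             out.append(chr(x + ord("A")))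
--         elif "a" <= ch <= "z":
--             y = ord(ch) - ord("a")
--             x = (inv * (y - b)) % 26
--             out.append(chr(x + ord("a")))
--         else:
--             out.append(ch)
--     return "".join(out)
-- ===== SOURCE B (Python) =====
-- def _egcd(a, b):
--     if b == 0:
--         return (a, 1, 0)
--     g, x, y = _egcd(b, a % b)
--     return (g, y, x - (a // b) * y)
--
-- def decode_affine(data: str, a: int, b: int) -> str:
--     g, x, _ = _egcd(a % 26, 26)
--     if g != 1:
--         raise ValueError("no modular inverse")
--     inv = x % 26
--     off = [(inv * (i - b)) % 26 for i in range(26)]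
--     out = []
--     for ch in data:
--         o = ord(ch)
--         if 65 <= o <= 90:
--             out.append(chr(65 + off[o - 65]))
--         elif 97 <= o <= 122:
--             out.append(chr(97 + off[o - 97]))
--         else:
--             out.append(ch)
--     return "".join(out)
-- ===== Notes on version B (the rewrite author's own statement) =====
-- stated objective: alternative
-- what changed: B computes the modular inverse by extended Euclid instead of A's brute-force 1..25 scan, and precomputes the 26-entry decode offset table once so the per-character pass is a table lookup instead of per-character modular arithmetic.
import Mathlib
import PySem

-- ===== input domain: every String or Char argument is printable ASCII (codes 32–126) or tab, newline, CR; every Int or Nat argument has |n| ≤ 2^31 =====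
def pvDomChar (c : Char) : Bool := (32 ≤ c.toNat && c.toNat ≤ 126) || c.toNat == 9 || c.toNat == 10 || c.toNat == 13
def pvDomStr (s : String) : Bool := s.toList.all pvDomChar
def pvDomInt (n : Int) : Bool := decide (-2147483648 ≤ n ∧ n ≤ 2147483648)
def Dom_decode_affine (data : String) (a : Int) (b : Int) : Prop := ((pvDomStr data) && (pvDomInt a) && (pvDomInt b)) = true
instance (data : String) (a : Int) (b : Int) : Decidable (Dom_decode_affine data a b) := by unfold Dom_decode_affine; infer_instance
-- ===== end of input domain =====

-- B replaces A's brute-force 1..25 inverse scan by extended Euclid and precomputes the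
-- 26-entry offset table once, so the per-character pass is a table lookup (alternative implementation, similar cost).

-- ===== PORT A =====
-- A's _mod_inv: a %= m, then first x in range(1, m) with (a*x) % m == 1; none = ValueError.
def mod_inv (a : Int) (m : Int) : Option Int :=
  let a' := PySem.Int.mod a m
  (PySem.List.pyRange 1 m 1).find? (fun x => PySem.Int.mod (a' * x) m == 1)

def decode_affine (data : String) (a : Int) (b : Int) : String :=
  match mod_inv a 26 with
  | none => ""   -- unreachable under Pre_ (Python raises ValueError here)
  | some inv =>
    String.ofList (data.toList.foldl (fun out ch =>
      if 'A' ≤ ch ∧ ch ≤ 'Z' then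
        let y : Int := (ch.toNat : Int) - 65
        let x := PySem.Int.mod (inv * (y - b)) 26
        out ++ [Char.ofNat (x + 65).toNat]
      else if 'a' ≤ ch ∧ ch ≤ 'z' then
        let y : Int := (ch.toNat : Int) - 97
        let x := PySem.Int.mod (inv * (y - b)) 26
        out ++ [Char.ofNat (x + 97).toNat]
      else out ++ [ch]) [])

-- ===== PORT B =====
-- B's _egcd; fuel only makes the Python recursion total in Lean (the call uses fuel 64 ≫ depth).
def egcd (fuel : Nat) (a : Int) (b : Int) : Int × Int × Int :=
  match fuel with
  | 0 => (a, 1, 0)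
  | fuel + 1 =>
    if b = 0 then (a, 1, 0)
    else
      let r := egcd fuel b (PySem.Int.mod a b)
      (r.1, r.2.2, r.2.1 - PySem.Int.floordiv a b * r.2.2)

def decode_affine_alt (data : String) (a : Int) (b : Int) : String :=
  let e := egcd 64 (PySem.Int.mod a 26) 26
  if e.1 ≠ 1 then ""   -- unreachable under Pre_ (Python raises ValueError here)
  else
    let inv := PySem.Int.mod e.2.1 26
    let off := (PySem.List.pyRange 0 26 1).map (fun i => PySem.Int.mod (inv * (i - b)) 26)
    String.ofList (data.toList.map (fun ch =>
      let o : Int := (ch.toNat : Int)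
      if 65 ≤ o ∧ o ≤ 90 then
        match PySem.List.pyGet? off (o - 65) with
        | some x => Char.ofNat (65 + x).toNat
        | none => ch
      else if 97 ≤ o ∧ o ≤ 122 then
        match PySem.List.pyGet? off (o - 97) with
        | some x => Char.ofNat (97 + x).toNat
        | none => ch
      else ch))

-- ===== PRECONDITION & SPEC =====
-- Pre_ excludes exactly the inputs where A raises ValueError (a not invertible mod 26); B raises there too.
def Pre_decode_affine (data : String) (a : Int) (b : Int) : Prop := Int.gcd a 26 = 1
instance (data : String) (a : Int) (b : Int) : Decidable (Pre_decode_affine data a b) := by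
  unfold Pre_decode_affine; infer_instance

def pvWitness_decode_affine : String × Int × Int := ("Khoor, Zruog!", 1, 3)

def Spec_decode_affine (data : String) (a : Int) (b : Int) (out : String) : Prop := out = decode_affine_alt data a b
instance (data : String) (a : Int) (b : Int) (out : String) : Decidable (Spec_decode_affine data a b out) := by unfold Spec_decode_affine; infer_instance

-- ===== CLAIM (what is proved, stated in full; the proofs are below) =====
def Claim_equal_decode_affine : Prop := ∀ (data : String) (a : Int) (b : Int), Dom_decode_affine data a b → Pre_decode_affine data a b → Spec_decode_affine data a b (decode_affine data a b)

-- ===== LEMMAS AND PROOFS =====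

-- B's inverse computation, as an Option, and B's per-character pass, as proof-side helpers.
def invB (a : Int) : Option Int :=
  let e := egcd 64 (PySem.Int.mod a 26) 26
  if e.1 ≠ 1 then none else some (PySem.Int.mod e.2.1 26)

def altBody (data : String) (b : Int) (inv : Int) : String :=
  let off := (PySem.List.pyRange 0 26 1).map (fun i => PySem.Int.mod (inv * (i - b)) 26)
  String.ofList (data.toList.map (fun ch =>
    let o : Int := (ch.toNat : Int)
    if 65 ≤ o ∧ o ≤ 90 then
      match PySem.List.pyGet? off (o - 65) with
      | some x => Char.ofNat (65 + x).toNat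
      | none => ch
    else if 97 ≤ o ∧ o ≤ 122 then
      match PySem.List.pyGet? off (o - 97) with
      | some x => Char.ofNat (97 + x).toNat
      | none => ch
    else ch))

lemma alt_eq (data : String) (a b : Int) :
    decode_affine_alt data a b =
      match invB a with
      | none => ""
      | some inv => altBody data b inv := by
  unfold decode_affine_alt invB altBody
  by_cases h : (egcd 64 (PySem.Int.mod a 26) 26).1 = 1
  · rw [if_neg (not_not_intro h), if_neg (not_not_intro h)]
  · rw [if_pos h, if_pos h]

lemma mod_small (x : Int) (h0 : 0 ≤ x) (h1 : x < 26) : PySem.Int.mod x 26 = x := by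
  rw [PySem.Int.mod_eq_emod_of_pos (by omega), Int.emod_eq_of_lt h0 h1]

lemma mod_idem (a : Int) : PySem.Int.mod (PySem.Int.mod a 26) 26 = PySem.Int.mod a 26 :=
  mod_small _ (PySem.Int.mod_nonneg _ (by omega)) (PySem.Int.mod_lt _ (by omega))

-- both inverse computations factor through a % 26
lemma mod_inv_mod (a : Int) : mod_inv a 26 = mod_inv (PySem.Int.mod a 26) 26 := by
  unfold mod_inv
  rw [mod_idem]

lemma invB_mod (a : Int) : invB a = invB (PySem.Int.mod a 26) := by
  unfold invB
  rw [mod_idem]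

lemma inv_agree_small : ∀ n : Nat, n < 26 → mod_inv (n : Int) 26 = invB (n : Int) := by decide

lemma inv_agree (a : Int) : mod_inv a 26 = invB a := by
  rw [mod_inv_mod, invB_mod]
  have hlo : 0 ≤ PySem.Int.mod a 26 := PySem.Int.mod_nonneg _ (by omega)
  have hhi : PySem.Int.mod a 26 < 26 := PySem.Int.mod_lt _ (by omega)
  have h : PySem.Int.mod a 26 = ((PySem.Int.mod a 26).toNat : Int) := by omega
  rw [h]
  exact inv_agree_small _ (by omega)

-- A's per-character results, named so the loop-shape lemma below applies.
def chU (inv b : Int) (ch : Char) : Char :=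
  Char.ofNat (PySem.Int.mod (inv * ((ch.toNat : Int) - 65 - b)) 26 + 65).toNat

def chL (inv b : Int) (ch : Char) : Char :=
  Char.ofNat (PySem.Int.mod (inv * ((ch.toNat : Int) - 97 - b)) 26 + 97).toNat

lemma foldl_if3 {α β : Type} (p q : α → Prop) [DecidablePred p] [DecidablePred q]
    (u v w : α → β) :
    ∀ (l : List α) (acc : List β),
      l.foldl (fun out ch =>
          if p ch then out ++ [u ch]
          else if q ch then out ++ [v ch]
          else out ++ [w ch]) acc
        = acc ++ l.map (fun ch => if p ch then u ch else if q ch then v ch else w ch) := by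
  intro l
  induction l with
  | nil => simp
  | cons x xs ih =>
    intro acc
    simp only [List.foldl, List.map]
    rw [ih]
    split_ifs <;> simp

lemma off_get (inv b : Int) (k : Int) (h0 : 0 ≤ k) (h1 : k < 26) :
    PySem.List.pyGet? ((PySem.List.pyRange 0 26 1).map
      (fun i => PySem.Int.mod (inv * (i - b)) 26)) k
    = some (PySem.Int.mod (inv * (k - b)) 26) := by
  have hk : k = (k.toNat : Int) := by omega
  have h26 : ((26 : Nat) : Int) = (26 : Int) := by norm_num
  rw [hk, PySem.List.pyGet?_natCast, ← h26,
      PySem.List.getElem?_map_pyRange_zero _ 26 k.toNat (by omega)]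

lemma pre_some (a : Int) (h : Int.gcd a 26 = 1) : mod_inv a 26 ≠ none := by
  rw [mod_inv_mod]
  have hsmall : ∀ n : Nat, n < 26 → Int.gcd (n : Int) 26 = 1 → mod_inv (n : Int) 26 ≠ none := by
    decide
  have hlo : 0 ≤ PySem.Int.mod a 26 := PySem.Int.mod_nonneg _ (by omega)
  have hhi : PySem.Int.mod a 26 < 26 := PySem.Int.mod_lt _ (by omega)
  have hm : PySem.Int.mod a 26 = ((PySem.Int.mod a 26).toNat : Int) := by omega
  have hgcd : Int.gcd (PySem.Int.mod a 26) 26 = 1 := by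
    rw [PySem.Int.mod_eq_emod_of_pos (by omega), Int.gcd_emod a 26]
    exact h
  rw [hm] at hgcd ⊢
  exact hsmall _ (by omega) hgcd

lemma char_le_iff (c d : Char) : (c ≤ d) ↔ c.toNat ≤ d.toNat := by
  rw [Char.le_def, UInt32.le_iff_toNat_le]; exact Iff.rfl

-- ===== VERDICT (by name: the statement is the Claim_ definition above) =====
theorem decode_affine_spec : Claim_equal_decode_affine := by
  intro data a b _ hpre
  unfold Spec_decode_affine decode_affine
  rw [alt_eq, ← inv_agree]
  rcases h : mod_inv a 26 with _ | inv
  · exact absurd h (pre_some a hpre)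
  · show String.ofList (data.toList.foldl (fun out ch =>
        if 'A' ≤ ch ∧ ch ≤ 'Z' then out ++ [chU inv b ch]
        else if 'a' ≤ ch ∧ ch ≤ 'z' then out ++ [chL inv b ch]
        else out ++ [ch]) []) = altBody data b inv
    unfold altBody
    rw [foldl_if3]
    simp only [List.nil_append]
    congr 1
    apply List.map_congr_left
    intro ch _
    have hA : ('A' ≤ ch ∧ ch ≤ 'Z') ↔ (65 ≤ (ch.toNat : Int) ∧ (ch.toNat : Int) ≤ 90) := by
      rw [char_le_iff, char_le_iff]
      show (65 ≤ ch.toNat ∧ ch.toNat ≤ 90) ↔ _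
      omega
    have ha : ('a' ≤ ch ∧ ch ≤ 'z') ↔ (97 ≤ (ch.toNat : Int) ∧ (ch.toNat : Int) ≤ 122) := by
      rw [char_le_iff, char_le_iff]
      show (97 ≤ ch.toNat ∧ ch.toNat ≤ 122) ↔ _
      omega
    by_cases hU : 65 ≤ (ch.toNat : Int) ∧ (ch.toNat : Int) ≤ 90
    · rw [if_pos (hA.mpr hU)]
      simp only [if_pos hU]
      rw [off_get inv b _ (by omega) (by omega)]
      unfold chU
      rw [Int.add_comm (PySem.Int.mod (inv * ((ch.toNat : Int) - 65 - b)) 26) 65]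
    · rw [if_neg (fun hc => hU (hA.mp hc))]
      simp only [if_neg hU]
      by_cases hL : 97 ≤ (ch.toNat : Int) ∧ (ch.toNat : Int) ≤ 122
      · rw [if_pos (ha.mpr hL)]
        simp only [if_pos hL]
        rw [off_get inv b _ (by omega) (by omega)]
        unfold chL
        rw [Int.add_comm (PySem.Int.mod (inv * ((ch.toNat : Int) - 97 - b)) 26) 97]
      · rw [if_neg (fun hc => hL (ha.mp hc)), if_neg hL]
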